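-- pv_equiv track=rewrite | github.com/drew2a/git-insights | plot_number_of_contributors.py | aggregate_contributors_by_time
-- ===== SOURCE A (Python) =====
-- from collections import defaultdict
--
-- def aggregate_contributors_by_time(activity_periods):
--     unique_dates = set()
--     end_dates = set()
--     for periods in activity_periods.values():
--         for start_date, end_date, _ in periods:
--             unique_dates.add(start_date)
--             unique_dates.add(end_date)
--             end_dates.add(end_date)
--
--     sorted_dates = sorted(unique_dates)
--
--     contributor_count_by_date = defaultdict(int)
--     for date in sorted_dates:
--         for periods in activity_periods.values():
--             for start_date, end_date, _ in periods:
--                 if start_date <= date <= end_date: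
--                     contributor_count_by_date[date] += 1
--
--         if date in end_dates:
--             contributor_count_by_date[date] -= 1
--
--     return sorted(contributor_count_by_date.items())
-- ===== SOURCE B (Python) =====
-- def aggregate_contributors_by_time(activity_periods):
--     starts = []
--     ends = []
--     end_dates = set()
--     unique_dates = set()
--     for periods in activity_periods.values():
--         for start_date, end_date, _ in periods:
--             unique_dates.add(start_date)
--             unique_dates.add(end_date)
--             end_dates.add(end_date)
--             if start_date <= end_date:  # an empty (reversed) period covers no date
--                 starts.append(start_date)
--                 ends.append(end_date)
--     starts.sort()
--     ends.sort()
--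
--     result = []
--     i = j = 0  # starts[:i] <= current date, ends[:j] < current date
--     for date in sorted(unique_dates):
--         while i < len(starts) and starts[i] <= date:
--             i += 1
--         while j < len(ends) and ends[j] < date:
--             j += 1
--         count = i - j
--         if date in end_dates:
--             result.append((date, count - 1))
--         elif count:
--             result.append((date, count))
--     return result
-- ===== Notes on version B (the rewrite author's own statement) =====
-- stated objective: faster
-- what changed: A rescans every period for every distinct date (O(D*P)); B sorts the valid start and end dates once and sweeps the sorted dates with two monotone pointers, so each period is touched O(1) times after an O(P log P) sort.
import Mathlib
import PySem

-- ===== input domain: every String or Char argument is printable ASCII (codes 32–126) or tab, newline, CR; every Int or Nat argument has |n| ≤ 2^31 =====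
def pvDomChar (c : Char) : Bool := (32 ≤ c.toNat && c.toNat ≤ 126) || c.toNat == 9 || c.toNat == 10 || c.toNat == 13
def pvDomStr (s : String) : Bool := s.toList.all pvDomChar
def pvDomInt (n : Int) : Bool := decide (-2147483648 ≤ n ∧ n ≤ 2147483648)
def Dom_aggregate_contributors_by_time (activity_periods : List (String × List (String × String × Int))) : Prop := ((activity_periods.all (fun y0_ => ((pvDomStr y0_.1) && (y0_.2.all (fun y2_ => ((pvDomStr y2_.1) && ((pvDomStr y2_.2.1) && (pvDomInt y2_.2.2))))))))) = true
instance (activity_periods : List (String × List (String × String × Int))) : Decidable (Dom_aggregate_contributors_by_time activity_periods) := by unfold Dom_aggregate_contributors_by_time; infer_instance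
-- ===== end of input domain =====

-- B replaces A's per-date rescan of all periods by a single sorted sweep with two monotone pointers.

-- ===== PORT A =====
-- Literal port of A: build the date/end-date sets, then for each sorted date rescan
-- every period, counting into a defaultdict; finally sorted(items).
def aggregate_contributors_by_time (activity_periods : List (String × List (String × String × Int))) : List (String × Int) :=
  let sets := activity_periods.foldl
    (fun (st : PySem.Set String × PySem.Set String) kv =>
      kv.2.foldl
        (fun (st : PySem.Set String × PySem.Set String) p =>
          (PySem.Set.add (PySem.Set.add st.1 p.1) p.2.1, PySem.Set.add st.2 p.2.1)) st)
    (PySem.Set.empty, PySem.Set.empty)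
  let unique_dates := sets.1
  let end_dates := sets.2
  let sorted_dates := PySem.List.sorted unique_dates (fun x => x)
  let cnt := sorted_dates.foldl
    (fun (d : PySem.Dict String Int) date =>
      let d := activity_periods.foldl
        (fun (d : PySem.Dict String Int) kv =>
          kv.2.foldl
            (fun (d : PySem.Dict String Int) p =>
              if p.1 ≤ date ∧ date ≤ p.2.1 then d.modify date 0 (· + 1) else d) d) d
      if PySem.Set.contains end_dates date then d.modify date 0 (· - 1) else d)
    PySem.Dict.empty
  PySem.List.sorted2 cnt.items (fun x => x.1) (fun x => x.2)

-- ===== PORT B =====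
-- 'while i < len(xs) and p(xs[i]): i += 1' — returns (remaining suffix xs[i:], new i)
def pvAdvance (p : String → Bool) : List String → Int → List String × Int
  | [], i => ([], i)
  | x :: xs, i => if p x then pvAdvance p xs (i + 1) else (x :: xs, i)

-- 'for date in sorted_dates: …' of B, carrying the two pointers (as suffix + count)
def pvSweep (end_dates : PySem.Set String) :
    List String → List String → List String → Int → Int → List (String × Int)
  | [], _, _, _, _ => []
  | date :: rest, ss, es, i, j =>
    let ai := pvAdvance (fun x => decide (x ≤ date)) ss i
    let aj := pvAdvance (fun x => decide (x < date)) es j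
    let count := ai.2 - aj.2
    (if PySem.Set.contains end_dates date then [(date, count - 1)]
     else if count ≠ 0 then [(date, count)] else []) ++
      pvSweep end_dates rest ai.1 aj.1 ai.2 aj.2

def aggregate_contributors_by_time_alt (activity_periods : List (String × List (String × String × Int))) : List (String × Int) :=
  let st := activity_periods.foldl
    (fun (st : List String × List String × PySem.Set String × PySem.Set String) kv =>
      kv.2.foldl
        (fun (st : List String × List String × PySem.Set String × PySem.Set String) p =>
          let ud := PySem.Set.add (PySem.Set.add st.2.2.1 p.1) p.2.1
          let ed := PySem.Set.add st.2.2.2 p.2.1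
          if p.1 ≤ p.2.1 then (st.1 ++ [p.1], st.2.1 ++ [p.2.1], ud, ed)
          else (st.1, st.2.1, ud, ed)) st)
    ([], [], PySem.Set.empty, PySem.Set.empty)
  let starts := PySem.List.sorted st.1 (fun x => x)
  let ends := PySem.List.sorted st.2.1 (fun x => x)
  let sorted_dates := PySem.List.sorted st.2.2.1 (fun x => x)
  pvSweep st.2.2.2 sorted_dates starts ends 0 0

-- ===== PRECONDITION & SPEC =====
def Spec_aggregate_contributors_by_time (activity_periods : List (String × List (String × String × Int))) (out : List (String × Int)) : Prop := out = aggregate_contributors_by_time_alt activity_periods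
instance (activity_periods : List (String × List (String × String × Int))) (out : List (String × Int)) : Decidable (Spec_aggregate_contributors_by_time activity_periods out) := by unfold Spec_aggregate_contributors_by_time; infer_instance

-- ===== CLAIM (what is proved, stated in full; the proofs are below) =====
def Claim_equal_aggregate_contributors_by_time : Prop := ∀ (activity_periods : List (String × List (String × String × Int))), Dom_aggregate_contributors_by_time activity_periods → Spec_aggregate_contributors_by_time activity_periods (aggregate_contributors_by_time activity_periods)

-- ===== LEMMAS AND PROOFS =====

-- all periods of all contributors, in iteration order
def pvPeriods (ap : List (String × List (String × String × Int))) : List (String × String × Int) :=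
  ap.flatMap (·.2)

def pvValid (p : String × String × Int) : Bool := decide (p.1 ≤ p.2.1)

-- number of periods covering date d
def pvCov (P : List (String × String × Int)) (d : String) : Nat :=
  P.countP (fun p => decide (p.1 ≤ d ∧ d ≤ p.2.1))

def pvEntry (P : List (String × String × Int)) (eset : PySem.Set String) (d : String) : Option (String × Int) :=
  if 0 < pvCov P d ∨ d ∈ eset
  then some (d, (pvCov P d : Int) - (if d ∈ eset then 1 else 0))
  else none

lemma pv_foldl_flatMap {β γ σ : Type} (l : List β) (g : β → List γ) (f : σ → γ → σ) (s : σ) :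
    (l.flatMap g).foldl f s = l.foldl (fun s x => (g x).foldl f s) s := by
  induction l generalizing s with
  | nil => rfl
  | cons a t ih => simp [List.flatMap_cons, List.foldl_append, ih]

lemma pv_pair_split (P : List (String × String × Int)) :
    ∀ (s1 s2 : PySem.Set String),
    P.foldl (fun (st : PySem.Set String × PySem.Set String) p =>
        (PySem.Set.add (PySem.Set.add st.1 p.1) p.2.1, PySem.Set.add st.2 p.2.1)) (s1, s2)
      = (P.foldl (fun s p => PySem.Set.add (PySem.Set.add s p.1) p.2.1) s1,
         P.foldl (fun s p => PySem.Set.add s p.2.1) s2) := by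
  induction P with
  | nil => intro s1 s2; rfl
  | cons a t ih => intro s1 s2; simp [List.foldl_cons, ih]

lemma pv_dates_fold (P : List (String × String × Int)) :
    P.foldl (fun s p => PySem.Set.add (PySem.Set.add s p.1) p.2.1) PySem.Set.empty
      = PySem.Set.ofList (P.flatMap (fun p => [p.1, p.2.1])) := by
  rw [PySem.Set.ofList_eq_foldl, pv_foldl_flatMap]
  rfl

lemma pv_ends_fold (P : List (String × String × Int)) :
    P.foldl (fun s p => PySem.Set.add s p.2.1) PySem.Set.empty
      = PySem.Set.ofList (P.map (·.2.1)) := by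
  rw [PySem.Set.ofList_eq_foldl, List.foldl_map]
  rfl

lemma pv_bfold (P : List (String × String × Int)) :
    ∀ (a b : List String) (s1 s2 : PySem.Set String),
    P.foldl (fun (st : List String × List String × PySem.Set String × PySem.Set String) p =>
        let ud := PySem.Set.add (PySem.Set.add st.2.2.1 p.1) p.2.1
        let ed := PySem.Set.add st.2.2.2 p.2.1
        if p.1 ≤ p.2.1 then (st.1 ++ [p.1], st.2.1 ++ [p.2.1], ud, ed)
        else (st.1, st.2.1, ud, ed)) (a, b, s1, s2)
      = (a ++ (P.filter pvValid).map (·.1), b ++ (P.filter pvValid).map (·.2.1),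
         P.foldl (fun s p => PySem.Set.add (PySem.Set.add s p.1) p.2.1) s1,
         P.foldl (fun s p => PySem.Set.add s p.2.1) s2) := by
  induction P with
  | nil => intro a b s1 s2; simp
  | cons p t ih =>
    intro a b s1 s2
    simp only [List.foldl_cons]
    show List.foldl _ (if p.1 ≤ p.2.1 then (a ++ [p.1], b ++ [p.2.1], PySem.Set.add (PySem.Set.add s1 p.1) p.2.1, PySem.Set.add s2 p.2.1) else (a, b, PySem.Set.add (PySem.Set.add s1 p.1) p.2.1, PySem.Set.add s2 p.2.1)) t = _
    by_cases h : p.1 ≤ p.2.1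
    · rw [if_pos h, ih]
      simp [pvValid, List.filter_cons, h]
    · rw [if_neg h, ih]
      simp [pvValid, List.filter_cons, h]

lemma pv_countP_takeWhile (p : String → Bool)
    (hm : ∀ x y : String, x ≤ y → p y = true → p x = true) :
    ∀ (ss : List String), ss.Pairwise (· ≤ ·) →
      ss.countP p = (ss.takeWhile p).length := by
  intro ss hs
  induction ss with
  | nil => rfl
  | cons x xs ih =>
    rcases List.pairwise_cons.mp hs with ⟨hx, ht⟩
    by_cases hpx : p x = true
    · simp [List.countP_cons, List.takeWhile_cons, hpx, ih ht]
    · simp only [List.takeWhile_cons]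
      rw [if_neg (by simp [hpx])]
      simp only [List.countP_cons, hpx]
      have : xs.countP p = 0 := by
        rw [List.countP_eq_zero]
        intro y hy hpy
        exact hpx (hm x y (hx y hy) hpy)
      simp [this]

lemma pv_advance_eq (p : String → Bool) :
    ∀ (ss : List String) (i : Int),
      pvAdvance p ss i = (ss.dropWhile p, i + ((ss.takeWhile p).length : Int)) := by
  intro ss
  induction ss with
  | nil => intro i; simp [pvAdvance]
  | cons x xs ih =>
    intro i
    by_cases hp : p x = true
    · simp [pvAdvance, hp, ih]; omega
    · simp [pvAdvance, hp]

lemma pv_takeWhile_split (p q : String → Bool) :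
    ∀ (ss : List String), (∀ x ∈ ss.takeWhile q, p x = true) →
      ss.takeWhile p = ss.takeWhile q ++ (ss.dropWhile q).takeWhile p := by
  intro ss
  induction ss with
  | nil => intro _; rfl
  | cons x xs ih =>
    intro h
    by_cases hq : q x = true
    · have hp : p x = true := h x (by simp [List.takeWhile_cons, hq])
      simp only [List.takeWhile_cons, List.dropWhile_cons, hq, hp, if_true]
      rw [ih (fun y hy => h y (by simp [hq, hy]))]
      simp
    · simp [List.takeWhile_cons, List.dropWhile_cons, hq]

lemma pv_sweep_spec (eset : PySem.Set String) (S E : List String) :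
    ∀ (ds ss es : List String) (i j : Int), ds.Pairwise (· ≤ ·) →
      (∀ d ∈ ds, i + ((ss.takeWhile (fun x => decide (x ≤ d))).length : Int)
          = (S.countP (fun x => decide (x ≤ d)) : Int)) →
      (∀ d ∈ ds, j + ((es.takeWhile (fun x => decide (x < d))).length : Int)
          = (E.countP (fun x => decide (x < d)) : Int)) →
      pvSweep eset ds ss es i j = ds.filterMap (fun d =>
        let c : Int := (S.countP (fun x => decide (x ≤ d)) : Int)
                       - (E.countP (fun x => decide (x < d)) : Int)
        if eset.contains d then some (d, c - 1)
        else if c ≠ 0 then some (d, c) else none) := by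
  intro ds
  induction ds with
  | nil => intro ss es i j _ _ _; rfl
  | cons date rest ih =>
    intro ss es i j hpw hS hE
    rcases List.pairwise_cons.mp hpw with ⟨hlt, hpw'⟩
    rw [pvSweep]
    rw [pv_advance_eq, pv_advance_eq]
    have hSd := hS date (by simp)
    have hEd := hE date (by simp)
    have hrec : pvSweep eset rest (ss.dropWhile (fun x => decide (x ≤ date)))
        (es.dropWhile (fun x => decide (x < date)))
        (i + ((ss.takeWhile (fun x => decide (x ≤ date))).length : Int))
        (j + ((es.takeWhile (fun x => decide (x < date))).length : Int))
        = rest.filterMap (fun d =>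
          let c : Int := (S.countP (fun x => decide (x ≤ d)) : Int)
                         - (E.countP (fun x => decide (x < d)) : Int)
          if eset.contains d then some (d, c - 1)
          else if c ≠ 0 then some (d, c) else none) := by
      apply ih _ _ _ _ hpw'
      · intro d hd
        have hsplit := pv_takeWhile_split (fun x => decide (x ≤ d)) (fun x => decide (x ≤ date)) ss
          (by
            intro x hx
            have hxd : x ≤ date := by simpa using List.mem_takeWhile_imp hx
            simp [le_trans hxd (hlt d hd)])
        rw [← hS d (by simp [hd]), hsplit]
        simp [List.length_append]
        omega
      · intro d hd
        have hsplit := pv_takeWhile_split (fun x => decide (x < d)) (fun x => decide (x < date)) es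
          (by
            intro x hx
            have hxd : x < date := by simpa using List.mem_takeWhile_imp hx
            simp [lt_of_lt_of_le hxd (hlt d hd)])
        rw [← hE d (by simp [hd]), hsplit]
        simp [List.length_append]
        omega
    rw [hrec, hSd, hEd, List.filterMap_cons]
    by_cases hm : date ∈ eset
    · simp [hm]
    · simp only [hm]
      split_ifs <;> simp_all

lemma pv_countP_sub {α : Type} (A B C : α → Bool)
    (h1 : ∀ p, B p = true → A p = true)
    (h2 : ∀ p, C p = true ↔ (A p = true ∧ B p = false)) :
    ∀ (P : List α), ((P.countP A : Int)) - (P.countP B : Int) = (P.countP C : Int) := by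
  intro P
  induction P with
  | nil => simp
  | cons p t ih =>
    simp only [List.countP_cons]
    by_cases hb : B p = true
    · have ha := h1 p hb
      have hc : ¬ C p = true := by rw [h2]; simp [hb]
      simp only [ha, hb, if_true, Bool.eq_false_iff.mpr hc] at *
      push_cast
      omega
    · by_cases ha : A p = true
      · have hc : C p = true := (h2 p).mpr ⟨ha, by simpa using hb⟩
        simp only [ha, hc, Bool.eq_false_iff.mpr hb] at *
        push_cast; omega
      · have hc : ¬ C p = true := by rw [h2]; simp [ha]
        simp only [Bool.eq_false_iff.mpr ha, Bool.eq_false_iff.mpr hb, Bool.eq_false_iff.mpr hc] at *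
        push_cast; omega

lemma pv_cov_eq (P : List (String × String × Int)) (d : String) :
    ((((P.filter pvValid).map (·.1)).countP (fun x => decide (x ≤ d)) : Int)
      - (((P.filter pvValid).map (·.2.1)).countP (fun x => decide (x < d)) : Int))
      = (pvCov P d : Int) := by
  rw [List.countP_map, List.countP_map, List.countP_filter, List.countP_filter]
  exact pv_countP_sub _ _ _
    (by
      intro p hb
      simp only [Function.comp, Bool.and_eq_true, decide_eq_true_eq, pvValid] at *
      exact ⟨le_of_lt (lt_of_le_of_lt hb.2 hb.1), hb.2⟩)
    (by
      intro p
      simp only [Function.comp, Bool.and_eq_true, Bool.and_eq_false_iff, decide_eq_true_eq,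
        decide_eq_false_iff_not, decide_eq_true_eq, pvValid, not_lt]
      constructor
      · rintro ⟨hs, he⟩
        exact ⟨⟨hs, le_trans hs he⟩, Or.inl he⟩
      · rintro ⟨⟨hs, hv⟩, he⟩
        rcases he with he | hv'
        · exact ⟨hs, he⟩
        · exact absurd hv hv') P

lemma pv_repeat_modify {α : Type} (k : String) :
    ∀ (l : List α) (d0 : PySem.Dict String Int),
      l.foldl (fun d _ => d.modify k 0 (· + 1)) d0
        = if l.length = 0 then d0 else d0.insert k (d0.getD k 0 + l.length) := by
  intro l
  induction l with
  | nil => intro d0; simp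
  | cons a t ih =>
    intro d0
    simp only [List.foldl_cons, ih, List.length_cons]
    have hm : d0.modify k 0 (· + 1) = d0.insert k (d0.getD k 0 + 1) := rfl
    by_cases ht : t.length = 0
    · simp [ht, hm]
    · rw [if_neg ht, if_neg (by omega), hm, PySem.Dict.getD_insert_self,
        PySem.Dict.insert_insert_self]
      congr 1
      push_cast; omega

lemma pv_innerA_eq (P : List (String × String × Int)) (date : String) (d0 : PySem.Dict String Int) :
    P.foldl (fun (d : PySem.Dict String Int) p =>
        if p.1 ≤ date ∧ date ≤ p.2.1 then d.modify date 0 (· + 1) else d) d0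
      = if pvCov P date = 0 then d0 else d0.insert date (d0.getD date 0 + pvCov P date) := by
  have h2 : P.foldl (fun (d : PySem.Dict String Int) p =>
        if p.1 ≤ date ∧ date ≤ p.2.1 then d.modify date 0 (· + 1) else d) d0
      = (P.filter (fun p => decide (p.1 ≤ date ∧ date ≤ p.2.1))).foldl
          (fun (d : PySem.Dict String Int) _ => d.modify date 0 (· + 1)) d0 := by
    rw [List.foldl_filter]
    simp only [decide_eq_true_eq]
  rw [h2, pv_repeat_modify]
  have : (P.filter (fun p => decide (p.1 ≤ date ∧ date ≤ p.2.1))).length = pvCov P date := by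
    rw [pvCov, List.countP_eq_length_filter]
  rw [this]

lemma pv_getD_of_not_contains (d : PySem.Dict String Int) (k : String) (v : Int)
    (h : d.contains k = false) : d.getD k v = v := by
  have := (PySem.Dict.get?_eq_none_iff_contains d k).mpr h
  simp [PySem.Dict.getD, this]

lemma pv_contains_insert_false (d : PySem.Dict String Int) (k k' : String) (v : Int)
    (h : d.contains k' = false) (hne : k' ≠ k) : (d.insert k v).contains k' = false := by
  rw [PySem.Dict.contains_eq_decide_mem_keys]
  simp only [decide_eq_false_iff_not, PySem.Dict.mem_keys_insert]
  rintro (rfl | hmem)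
  · exact hne rfl
  · rw [PySem.Dict.contains_eq_decide_mem_keys] at h
    simp at h
    exact h hmem

lemma pv_modify_eq (d : PySem.Dict String Int) (k : String) (f : Int → Int) :
    d.modify k 0 f = d.insert k (f (d.getD k 0)) := rfl

lemma pv_foldA_items (P : List (String × String × Int)) (eset : PySem.Set String) :
    ∀ (ds : List String) (d0 : PySem.Dict String Int), ds.Pairwise (· < ·) →
      (∀ d ∈ ds, d0.contains d = false) →
      (ds.foldl (fun (d : PySem.Dict String Int) date =>
          if PySem.Set.contains eset date then
            (P.foldl (fun (d : PySem.Dict String Int) p =>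
              if p.1 ≤ date ∧ date ≤ p.2.1 then d.modify date 0 (· + 1) else d) d).modify date 0 (· - 1)
          else P.foldl (fun (d : PySem.Dict String Int) p =>
              if p.1 ≤ date ∧ date ≤ p.2.1 then d.modify date 0 (· + 1) else d) d) d0).items
        = d0.items ++ ds.filterMap (pvEntry P eset) := by
  intro ds
  induction ds with
  | nil => intro d0 _ _; simp
  | cons date rest ih =>
    intro d0 hpw hfresh
    rcases List.pairwise_cons.mp hpw with ⟨hlt, hpw'⟩
    have hf0 : d0.contains date = false := hfresh date (by simp)
    have hg0 : d0.getD date 0 = 0 := pv_getD_of_not_contains _ _ _ hf0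
    simp only [List.foldl_cons]
    have hstep : (if PySem.Set.contains eset date then
            (P.foldl (fun (d : PySem.Dict String Int) p =>
              if p.1 ≤ date ∧ date ≤ p.2.1 then d.modify date 0 (· + 1) else d) d0).modify date 0 (· - 1)
          else P.foldl (fun (d : PySem.Dict String Int) p =>
              if p.1 ≤ date ∧ date ≤ p.2.1 then d.modify date 0 (· + 1) else d) d0)
        = if pvCov P date = 0 ∧ date ∉ eset then d0
          else d0.insert date ((pvCov P date : Int) - (if date ∈ eset then 1 else 0)) := by
      rw [pv_innerA_eq, hg0, zero_add]
      by_cases hm : date ∈ eset <;> by_cases hn0 : pvCov P date = 0 <;>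
        have hc := hm <;>
        simp only [← PySem.Set.contains_iff] at hc <;>
        first
        | (simp only [Bool.not_eq_true] at hc
           simp [hc, hn0, hm, pv_modify_eq, hg0, PySem.Dict.getD_insert_self,
             PySem.Dict.insert_insert_self])
        | simp [hc, hn0, hm, pv_modify_eq, hg0, PySem.Dict.getD_insert_self,
            PySem.Dict.insert_insert_self]
    rw [hstep]
    by_cases hskip : pvCov P date = 0 ∧ date ∉ eset
    · rw [if_pos hskip, ih d0 hpw' (fun d hd => hfresh d (by simp [hd]))]
      have he : pvEntry P eset date = none := by
        simp [pvEntry, hskip.1, hskip.2]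
      simp [List.filterMap_cons, he]
    · rw [if_neg hskip, ih _ hpw'
        (fun d hd => pv_contains_insert_false _ _ _ _ (hfresh d (by simp [hd]))
          (ne_of_gt (hlt d hd))),
        PySem.Dict.items_insert_of_not_contains _ _ hf0]
      have he : pvEntry P eset date
          = some (date, (pvCov P date : Int) - (if date ∈ eset then 1 else 0)) := by
        have : 0 < pvCov P date ∨ date ∈ eset := by
          by_cases hm : date ∈ eset
          · exact Or.inr hm
          · exact Or.inl (Nat.pos_of_ne_zero (fun h => hskip ⟨h, hm⟩))
        rw [pvEntry, if_pos this]
      rw [List.filterMap_cons, he]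
      simp

lemma pv_insert_fold_self :
    ∀ (l acc : List (String × Int)),
      l.Pairwise (fun a b => a.1 < b.1) →
      (∀ x ∈ l, ∀ y ∈ acc, y.1 < x.1) →
      l.foldl (fun acc x => PySem.List.insertBy
        (fun a b => decide (a.1 < b.1) || !decide (b.1 < a.1) && decide (a.2 < b.2)) x acc) acc
        = acc ++ l := by
  intro l
  induction l with
  | nil => intro acc _ _; simp
  | cons x xs ih =>
    intro acc hpw hacc
    rcases List.pairwise_cons.mp hpw with ⟨hx, hpw'⟩
    simp only [List.foldl_cons]
    rw [PySem.List.insertBy_of_forall_not_before _ _ _ (by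
      intro y hy
      have hyx : y.1 < x.1 := hacc x (by simp) y hy
      have h1 : ¬ x.1 < y.1 := not_lt.mpr (le_of_lt hyx)
      have h2 : ¬ x.1 ≤ y.1 := not_le.mpr hyx
      simp only [Bool.or_eq_false_iff, Bool.and_eq_false_iff, decide_eq_false_iff_not]
      exact ⟨h1, Or.inl (by simpa using hyx)⟩)]
    rw [ih (acc ++ [x]) hpw' (by
      intro z hz y hy
      rcases List.mem_append.mp hy with hy | hy
      · exact lt_trans (hacc x (by simp) y hy) (hx z hz)
      · simp at hy; subst hy; exact hx z hz)]
    simp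

lemma pv_sorted2_self (l : List (String × Int)) (h : l.Pairwise (fun a b => a.1 < b.1)) :
      PySem.List.sorted2 l (fun x => x.1) (fun x => x.2) = l := by
  show l.foldl _ [] = l
  have := pv_insert_fold_self l [] h (by simp)
  simpa using this

lemma pv_hA (ap : List (String × List (String × String × Int))) :
    aggregate_contributors_by_time ap
      = (PySem.List.sorted (PySem.Set.ofList ((pvPeriods ap).flatMap (fun p => [p.1, p.2.1]))) (fun x => x)).filterMap
          (pvEntry (ap.flatMap (·.2)) (PySem.Set.ofList ((ap.flatMap (·.2)).map (·.2.1)))) := by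
  unfold aggregate_contributors_by_time
  simp only [pvPeriods]
  rw [show (ap.foldl
    (fun (st : PySem.Set String × PySem.Set String) kv =>
      kv.2.foldl
        (fun (st : PySem.Set String × PySem.Set String) p =>
          (PySem.Set.add (PySem.Set.add st.1 p.1) p.2.1, PySem.Set.add st.2 p.2.1)) st)
    (PySem.Set.empty, PySem.Set.empty))
    = (PySem.Set.ofList ((ap.flatMap (·.2)).flatMap (fun p => [p.1, p.2.1])),
       PySem.Set.ofList ((ap.flatMap (·.2)).map (·.2.1))) from by
    rw [← pv_foldl_flatMap ap (·.2), pv_pair_split, pv_dates_fold, pv_ends_fold]]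
  dsimp only
  simp only [← pv_foldl_flatMap ap (·.2)]
  have hpwlt : (PySem.List.sorted (PySem.Set.ofList ((ap.flatMap (·.2)).flatMap (fun p => [p.1, p.2.1]))) (fun x => x)).Pairwise (· < ·) :=
    PySem.List.sorted_ofList_pairwise_lt _
  rw [pv_foldA_items (ap.flatMap (·.2)) _ _ _ hpwlt (by intro d _; rfl)]
  rw [show (PySem.Dict.empty : PySem.Dict String Int).items = [] from rfl, List.nil_append]
  apply pv_sorted2_self
  rw [List.pairwise_filterMap]
  apply hpwlt.imp_of_mem
  intro a b _ _ hab x hx y hy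
  have hxa : x.1 = a := by
    unfold pvEntry at hx
    split at hx
    · cases Option.some.inj hx; rfl
    · cases hx
  have hyb : y.1 = b := by
    unfold pvEntry at hy
    split at hy
    · cases Option.some.inj hy; rfl
    · cases hy
  rw [hxa, hyb]
  exact hab

lemma pv_hB (ap : List (String × List (String × String × Int))) :
    aggregate_contributors_by_time_alt ap
      = (PySem.List.sorted (PySem.Set.ofList ((ap.flatMap (·.2)).flatMap (fun p => [p.1, p.2.1]))) (fun x => x)).filterMap
          (pvEntry (ap.flatMap (·.2)) (PySem.Set.ofList ((ap.flatMap (·.2)).map (·.2.1)))) := by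
  unfold aggregate_contributors_by_time_alt
  rw [show (ap.foldl
    (fun (st : List String × List String × PySem.Set String × PySem.Set String) kv =>
      kv.2.foldl
        (fun (st : List String × List String × PySem.Set String × PySem.Set String) p =>
          let ud := PySem.Set.add (PySem.Set.add st.2.2.1 p.1) p.2.1
          let ed := PySem.Set.add st.2.2.2 p.2.1
          if p.1 ≤ p.2.1 then (st.1 ++ [p.1], st.2.1 ++ [p.2.1], ud, ed)
          else (st.1, st.2.1, ud, ed)) st)
    ([], [], PySem.Set.empty, PySem.Set.empty))
    = (((ap.flatMap (·.2)).filter pvValid).map (·.1),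
       ((ap.flatMap (·.2)).filter pvValid).map (·.2.1),
       PySem.Set.ofList ((ap.flatMap (·.2)).flatMap (fun p => [p.1, p.2.1])),
       PySem.Set.ofList ((ap.flatMap (·.2)).map (·.2.1))) from by
    rw [← pv_foldl_flatMap ap (·.2), pv_bfold, pv_dates_fold, pv_ends_fold, List.nil_append,
      List.nil_append]]
  dsimp only
  have hmle : ∀ (d x y : String), x ≤ y → decide (y ≤ d) = true → decide (x ≤ d) = true := by
    intro d x y hxy h
    simp only [decide_eq_true_eq] at h ⊢
    exact le_trans hxy h
  have hmlt : ∀ (d x y : String), x ≤ y → decide (y < d) = true → decide (x < d) = true := by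
    intro d x y hxy h
    simp only [decide_eq_true_eq] at h ⊢
    exact lt_of_le_of_lt hxy h
  have hSsort : (PySem.List.sorted (((ap.flatMap (·.2)).filter pvValid).map (·.1)) (fun x => x)).Pairwise (· ≤ ·) := by
    have := PySem.List.sorted_pairwise (((ap.flatMap (·.2)).filter pvValid).map (·.1)) (fun x => x)
    simpa using this
  have hEsort : (PySem.List.sorted (((ap.flatMap (·.2)).filter pvValid).map (·.2.1)) (fun x => x)).Pairwise (· ≤ ·) := by
    have := PySem.List.sorted_pairwise (((ap.flatMap (·.2)).filter pvValid).map (·.2.1)) (fun x => x)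
    simpa using this
  rw [pv_sweep_spec _ _ _ _ _ _ 0 0
    ((PySem.List.sorted_ofList_pairwise_lt _).imp le_of_lt)
    (by
      intro d _
      rw [pv_countP_takeWhile _ (hmle d) _ hSsort]
      omega)
    (by
      intro d _
      rw [pv_countP_takeWhile _ (hmlt d) _ hEsort]
      omega)]
  apply List.filterMap_congr
  intro d _
  have hc : ((PySem.List.sorted (((ap.flatMap (·.2)).filter pvValid).map (·.1)) (fun x => x)).countP (fun x => decide (x ≤ d)) : Int)
      - ((PySem.List.sorted (((ap.flatMap (·.2)).filter pvValid).map (·.2.1)) (fun x => x)).countP (fun x => decide (x < d)) : Int)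
      = (pvCov (ap.flatMap (·.2)) d : Int) := by
    rw [List.Perm.countP_eq _ (PySem.List.sorted_perm _ _ _),
      List.Perm.countP_eq _ (PySem.List.sorted_perm _ _ _)]
    exact pv_cov_eq _ d
  dsimp only
  rw [hc]
  unfold pvEntry
  by_cases hm : d ∈ PySem.Set.ofList ((ap.flatMap (·.2)).map (·.2.1))
  · rw [if_pos (by simpa [PySem.Set.contains_iff] using hm), if_pos (Or.inr hm), if_pos hm]
  · rw [if_neg (by simpa [PySem.Set.contains_iff] using hm)]
    by_cases hz : pvCov (ap.flatMap (·.2)) d = 0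
    · rw [if_neg (by simp [hz]), if_neg (by simp [hz, hm])]
    · rw [if_pos (by simp; omega), if_pos (by left; omega), if_neg hm]
      norm_num

-- ===== VERDICT (by name: the statement is the Claim_ definition above) =====
theorem aggregate_contributors_by_time_spec : Claim_equal_aggregate_contributors_by_time := by
  intro ap _
  unfold Spec_aggregate_contributors_by_time
  rw [pv_hA, pv_hB]
  rfl
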